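-- pv_equiv track=rewrite | github.com/rgacogne/pdns | pdns/dnsdistdist/dnsdist-rust-lib/settings-generator.py | get_rust_object_name
-- ===== SOURCE A (Python) =====
-- def get_rust_object_name(name):
--     object_name = ''
--     capitalize = True
--     for char in name:
--         if char == '-':
--             capitalize = True
--             continue
--         if capitalize:
--             char = char.upper()
--             capitalize = False
--         object_name += char
--
--     return object_name
-- ===== SOURCE B (Python) =====
-- def get_rust_object_name(name):
--     return ''.join((part[0].upper() + part[1:]) if part else ''
--                    for part in name.split('-'))
-- ===== Notes on version B (the rewrite author's own statement) =====
-- stated objective: faster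
-- what changed: Replaces the char-by-char loop that grows the result with repeated string += under a capitalize flag by splitting the name on the dash separator, uppercasing each nonempty segment's first character, and joining once; no state is carried between iterations.
import Mathlib
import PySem

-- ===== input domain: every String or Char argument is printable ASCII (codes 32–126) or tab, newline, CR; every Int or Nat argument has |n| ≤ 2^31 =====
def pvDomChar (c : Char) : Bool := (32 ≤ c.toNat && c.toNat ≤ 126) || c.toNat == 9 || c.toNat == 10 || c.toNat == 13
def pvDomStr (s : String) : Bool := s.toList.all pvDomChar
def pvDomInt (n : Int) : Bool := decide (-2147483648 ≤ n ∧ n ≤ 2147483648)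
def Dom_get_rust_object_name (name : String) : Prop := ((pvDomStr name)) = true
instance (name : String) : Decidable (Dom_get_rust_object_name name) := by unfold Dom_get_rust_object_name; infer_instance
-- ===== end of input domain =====

-- B replaces A's char-by-char accumulator (capitalize flag, repeated string +=) by
-- split on dash + uppercase each segment's first char + one join (objective: faster, measured).

-- ===== PORT A =====
-- the loop body: '-' sets the flag, otherwise append (uppercased if the flag is set)
def pvStepA (st : List Char × Bool) (ch : Char) : List Char × Bool :=
  if ch = '-' then (st.1, true)
  else if st.2 then (st.1 ++ [PySem.Chars.upperChar ch], false)
  else (st.1 ++ [ch], false)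

def get_rust_object_name (name : String) : String :=
  String.mk (name.toList.foldl pvStepA (([] : List Char), true)).1

-- ===== PORT B =====
-- (part[0].upper() + part[1:]) if part else ''
def pvCapPart (p : List Char) : List Char :=
  match p with
  | [] => []
  | c :: r => PySem.Chars.upperChar c :: r

def get_rust_object_name_alt (name : String) : String :=
  String.mk (PySem.Chars.join [] ((PySem.Chars.splitOn name.toList ['-']).map pvCapPart))

-- ===== PRECONDITION & SPEC =====
def Spec_get_rust_object_name (name : String) (out : String) : Prop := out = get_rust_object_name_alt name
instance (name : String) (out : String) : Decidable (Spec_get_rust_object_name name out) := by unfold Spec_get_rust_object_name; infer_instance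

-- ===== CLAIM (what is proved, stated in full; the proofs are below) =====
def Claim_equal_get_rust_object_name : Prop := ∀ (name : String), Dom_get_rust_object_name name → Spec_get_rust_object_name name (get_rust_object_name name)

-- ===== LEMMAS AND PROOFS =====

-- structural characterisation of splitting on '-' : (first segment, remaining segments)
def pvSplitDash : List Char → List Char × List (List Char)
  | [] => ([], [])
  | c :: r =>
    let (h, t) := pvSplitDash r
    if c = '-' then ([], h :: t) else (c :: h, t)

theorem pvSplitOn_go_eq (fuel : Nat) (l cur : List Char) (acc : List (List Char))
    (h : l.length < fuel) :
    PySem.Chars.splitOn.go ['-'] fuel l cur acc =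
      acc.reverse ++ (cur.reverse ++ (pvSplitDash l).1) :: (pvSplitDash l).2 := by
  induction fuel generalizing l cur acc with
  | zero => omega
  | succ fuel ih =>
    cases l with
    | nil => simp [PySem.Chars.splitOn.go, pvSplitDash]
    | cons c r =>
      by_cases hc : c = '-'
      · subst hc
        have : PySem.Chars.splitOn.go ['-'] (fuel + 1) ('-' :: r) cur acc =
            PySem.Chars.splitOn.go ['-'] fuel r [] (cur.reverse :: acc) := by
          simp [PySem.Chars.splitOn.go, List.isPrefixOf]
        rw [this, ih r [] (cur.reverse :: acc) (by simpa using Nat.lt_of_succ_lt_succ h)]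
        simp [pvSplitDash]
      · have : PySem.Chars.splitOn.go ['-'] (fuel + 1) (c :: r) cur acc =
            PySem.Chars.splitOn.go ['-'] fuel r (c :: cur) acc := by
          simp [PySem.Chars.splitOn.go, List.isPrefixOf, hc, Ne.symm hc]
        rw [this, ih r (c :: cur) acc (by simpa using Nat.lt_of_succ_lt_succ h)]
        simp [pvSplitDash, hc]
  termination_by fuel

theorem pvSplitOn_eq (l : List Char) :
    PySem.Chars.splitOn l ['-'] = (pvSplitDash l).1 :: (pvSplitDash l).2 := by
  unfold PySem.Chars.splitOn
  rw [pvSplitOn_go_eq (l.length + 1) l [] [] (by omega)]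
  simp

-- A's loop, in closed recursive form (b = the capitalize flag)
def pvG : List Char → Bool → List Char
  | [], _ => []
  | c :: r, b =>
    if c = '-' then pvG r true
    else if b then PySem.Chars.upperChar c :: pvG r false
    else c :: pvG r false

theorem pvFoldA_eq (l : List Char) (acc : List Char) (b : Bool) :
    (l.foldl pvStepA (acc, b)).1 = acc ++ pvG l b := by
  induction l generalizing acc b with
  | nil => simp [pvG]
  | cons c r ih =>
    by_cases hc : c = '-'
    · subst hc; simp [pvStepA, pvG, ih]
    · cases b <;> simp [pvStepA, pvG, hc, ih]

theorem pvB_eq (l : List Char) :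
    ((pvSplitDash l).1 ++ ((pvSplitDash l).2.map pvCapPart).flatten = pvG l false) ∧
    (pvCapPart (pvSplitDash l).1 ++ ((pvSplitDash l).2.map pvCapPart).flatten = pvG l true) := by
  induction l with
  | nil => simp [pvSplitDash, pvG, pvCapPart]
  | cons c r ih =>
    by_cases hc : c = '-'
    · subst hc
      simp only [pvSplitDash, pvG, if_pos]
      exact ⟨by simpa [pvCapPart] using ih.2, by simpa [pvCapPart] using ih.2⟩
    · simp only [pvSplitDash, pvG, if_neg hc]
      cases hr : pvSplitDash r with
      | mk h t =>
        rw [hr] at ih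
        constructor
        · simpa [pvCapPart] using ih.1
        · simpa [pvCapPart] using ih.1

-- join with the empty separator is flatten
theorem pvJoinNil (ps : List (List Char)) : PySem.Chars.join [] ps = ps.flatten := by
  simp only [PySem.Chars.join, List.intercalate]
  induction ps with
  | nil => simp
  | cons p t ih =>
    cases t with
    | nil => simp
    | cons q t => simpa using ih

-- ===== VERDICT (by name: the statement is the Claim_ definition above) =====
theorem get_rust_object_name_spec : Claim_equal_get_rust_object_name := by
  intro name _
  unfold Spec_get_rust_object_name get_rust_object_name get_rust_object_name_alt
  rw [pvSplitOn_eq, pvFoldA_eq, pvJoinNil]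
  simp only [List.map_cons, List.flatten_cons, List.nil_append]
  exact congrArg String.mk ((pvB_eq name.toList).2).symm
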